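-- pv_equiv track=rewrite | github.com/yuufyu/wahaha | features/mjai_encoder.py | get_rel_rank
-- ===== SOURCE A (Python) =====
-- def sort_rel_scores(abs_scores, player_id) :
--     # scoreの並び順をplayer_id視点における順序に変更
--     return [abs_scores[(i + player_id) % 3]  for i in range(3)]
--
-- def get_rel_rank(abs_scores, player_id) :
--     rel_scores = sort_rel_scores(abs_scores, player_id)
--
--     # Calculate ranking by Mahjong rule
--     range_indices = range(len(rel_scores))
--     sorted_indices = sorted(range_indices, key = rel_scores.__getitem__, reverse = True)
--     ranks = [0] * len(sorted_indices)
--     for i, indices in enumerate(sorted_indices) :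
--         ranks[indices] = i
--     return ranks
-- ===== SOURCE B (Python) =====
-- def get_rel_rank(abs_scores, player_id):
--     # rank[j] = number of players strictly richer, plus equal-score players
--     # seated at an earlier relative position (Mahjong stable tie-break).
--     rel = [abs_scores[(i + player_id) % 3] for i in range(3)]
--     return [sum(1 for i, s in enumerate(rel) if s > rel[j] or (s == rel[j] and i < j))
--             for j in range(3)]
-- ===== Notes on version B (the rewrite author's own statement) =====
-- stated objective: alternative
-- what changed: Replaces A's sort-of-indices-then-scatter-into-a-rank-array with a direct pairwise counting pass: each rank is the number of relative scores that are strictly greater, plus the equal ones at an earlier position (the stable tie-break), so the sort and the mutable ranks array disappear.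
import Mathlib
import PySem

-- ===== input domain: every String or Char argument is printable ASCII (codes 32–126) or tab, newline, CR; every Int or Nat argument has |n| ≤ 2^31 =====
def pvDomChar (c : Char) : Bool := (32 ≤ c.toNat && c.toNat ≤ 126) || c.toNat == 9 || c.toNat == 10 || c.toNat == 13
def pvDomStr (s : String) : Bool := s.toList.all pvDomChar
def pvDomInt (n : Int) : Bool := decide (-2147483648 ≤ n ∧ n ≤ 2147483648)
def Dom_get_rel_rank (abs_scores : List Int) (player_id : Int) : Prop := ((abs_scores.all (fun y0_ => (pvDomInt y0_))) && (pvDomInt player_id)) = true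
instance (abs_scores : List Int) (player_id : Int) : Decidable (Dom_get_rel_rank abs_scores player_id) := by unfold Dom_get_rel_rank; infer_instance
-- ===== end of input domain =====

-- B replaces A's sort-then-scatter ranking by a direct pairwise counting pass (alternative decomposition, same cost).
-- ===== PORT A =====
-- sort_rel_scores: rel view rotation; pyGetD is exact here because Pre_ guarantees the index (i+player_id)%3 ∈ [0,3) is in range
def sort_rel_scores (abs_scores : List Int) (player_id : Int) : List Int :=
  (PySem.List.pyRange 0 3 1).map (fun i => PySem.List.pyGetD abs_scores (PySem.Int.mod (i + player_id) 3) 0)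

def get_rel_rank (abs_scores : List Int) (player_id : Int) : List Int :=
  let rel_scores := sort_rel_scores abs_scores player_id
  let sorted_indices :=
    PySem.List.sorted (PySem.List.pyRange 0 (rel_scores.length : Int) 1)
      (fun i => PySem.List.pyGetD rel_scores i 0) true
  let ranks : List Int := List.replicate sorted_indices.length 0
  (PySem.List.enumerate sorted_indices).foldl
    (fun ranks p => PySem.List.pySetD ranks p.2 p.1) ranks

-- ===== PORT B =====
def get_rel_rank_alt (abs_scores : List Int) (player_id : Int) : List Int :=
  let rel := (PySem.List.pyRange 0 3 1).map (fun i => PySem.List.pyGetD abs_scores (PySem.Int.mod (i + player_id) 3) 0)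
  (PySem.List.pyRange 0 3 1).map (fun j =>
    (PySem.List.enumerate rel).foldl
      (fun acc p =>
        if p.2 > PySem.List.pyGetD rel j 0 ∨ (p.2 = PySem.List.pyGetD rel j 0 ∧ p.1 < j) then acc + 1 else acc)
      (0 : Int))

-- ===== PRECONDITION & SPEC =====
-- Pre_ excludes exactly the inputs where A raises IndexError: lists shorter than 3 (the rotation reads indices 0,1,2).
def Pre_get_rel_rank (abs_scores : List Int) (player_id : Int) : Prop := 3 ≤ abs_scores.length
instance (abs_scores : List Int) (player_id : Int) : Decidable (Pre_get_rel_rank abs_scores player_id) := by unfold Pre_get_rel_rank; infer_instance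
def pvWitness_get_rel_rank : List Int × Int := ([25000, 25000, 25000], 1)
def Spec_get_rel_rank (abs_scores : List Int) (player_id : Int) (out : List Int) : Prop := out = get_rel_rank_alt abs_scores player_id
instance (abs_scores : List Int) (player_id : Int) (out : List Int) : Decidable (Spec_get_rel_rank abs_scores player_id out) := by unfold Spec_get_rel_rank; infer_instance

-- ===== CLAIM (what is proved, stated in full; the proofs are below) =====
def Claim_equal_get_rel_rank : Prop := ∀ (abs_scores : List Int) (player_id : Int), Dom_get_rel_rank abs_scores player_id → Pre_get_rel_rank abs_scores player_id → Spec_get_rel_rank abs_scores player_id (get_rel_rank abs_scores player_id)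

-- ===== LEMMAS AND PROOFS =====

-- ===== VERDICT-SUPPORT LEMMAS =====
-- Both ports factor (definitionally) through the 3-element relative-score list;
-- the core equality is proved for three arbitrary integers by case analysis on their order.
def coreA (rel : List Int) : List Int :=
  let sorted_indices := PySem.List.sorted (PySem.List.pyRange 0 (rel.length : Int) 1) (fun i => PySem.List.pyGetD rel i 0) true
  (PySem.List.enumerate sorted_indices).foldl (fun ranks p => PySem.List.pySetD ranks p.2 p.1)
    (List.replicate sorted_indices.length 0)

def coreB (rel : List Int) : List Int :=
  (PySem.List.pyRange 0 3 1).map (fun j =>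
    (PySem.List.enumerate rel).foldl
      (fun acc p => if p.2 > PySem.List.pyGetD rel j 0 ∨ (p.2 = PySem.List.pyGetD rel j 0 ∧ p.1 < j) then acc + 1 else acc)
      (0 : Int))

lemma rel_eq (abs_scores : List Int) (player_id : Int) :
    sort_rel_scores abs_scores player_id =
      [PySem.List.pyGetD abs_scores (PySem.Int.mod player_id 3) 0,
       PySem.List.pyGetD abs_scores (PySem.Int.mod (1 + player_id) 3) 0,
       PySem.List.pyGetD abs_scores (PySem.Int.mod (2 + player_id) 3) 0] := by
  simp [sort_rel_scores, PySem.List.pyRange, List.range_succ]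

set_option maxHeartbeats 2000000 in
lemma core_eq (a b c : Int) : coreA [a, b, c] = coreB [a, b, c] := by
  have hr : PySem.List.pyRange 0 3 1 = [0, 1, 2] := by decide
  have g0 : PySem.List.pyGetD [a, b, c] 0 0 = a := rfl
  have g1 : PySem.List.pyGetD [a, b, c] 1 0 = b := rfl
  have g2 : PySem.List.pyGetD [a, b, c] 2 0 = c := rfl
  simp only [coreA, coreB, List.length_cons, List.length_nil,
    PySem.List.sorted_rev_eq_foldl_insertBy]
  norm_num [hr, List.foldl, PySem.List.insertBy, g0, g1, g2, PySem.List.enumerate]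
  by_cases h1 : a < b <;>
    simp only [h1, if_true, if_false] <;>
    simp only [PySem.List.insertBy, g0, g1, g2, decide_eq_true_eq] <;>
    split_ifs <;>
    first
      | decide
      | omega

-- ===== VERDICT (by name: the statement is the Claim_ definition above) =====
theorem get_rel_rank_spec : Claim_equal_get_rel_rank := by
  intro abs_scores player_id _ _
  show get_rel_rank abs_scores player_id = get_rel_rank_alt abs_scores player_id
  have hA : get_rel_rank abs_scores player_id = coreA (sort_rel_scores abs_scores player_id) := rfl
  have hB : get_rel_rank_alt abs_scores player_id = coreB (sort_rel_scores abs_scores player_id) := rfl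
  rw [hA, hB, rel_eq]
  exact core_eq _ _ _
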